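-- pv_equiv track=rewrite | github.com/CaptainKokomo/Omnichat | build_installer.py | build_file_section
-- ===== SOURCE A (Python) =====
-- def escape_line(line: str) -> str:
--     if line == '':
--         return 'echo.'
--     escaped = line
--     replacements = [
--         ('^', '^^'),
--         ('&', '^&'),
--         ('|', '^|'),
--         ('>', '^>'),
--         ('<', '^<'),
--         ('(', '^('),
--         (')', '^)'),
--         ('%', '%%'),
--         ('!', '^!')
--     ]
--     for src, target in replacements:
--         escaped = escaped.replace(src, target)
--     return f'echo {escaped}'
--
-- def make_label_name(rel_path: str) -> str:
--     label = rel_path.replace('/', '_').replace('.', '_')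
--     return f'write_{label}'
--
-- def build_file_section(rel_path: str, lines):
--     label = make_label_name(rel_path)
--     body_lines = [f'  {escape_line(line)}' for line in lines] or ['  echo.']
--     section_lines = [
--         f':{label}',
--         'setlocal DisableDelayedExpansion',
--         '> "%~1" (',
--         *body_lines,
--         ')',
--         'endlocal',
--         'exit /b'
--     ]
--     section = '\n'.join(section_lines)
--     return label, section
-- ===== SOURCE B (Python) =====
-- _ESC = {'^': '^^', '&': '^&', '|': '^|', '>': '^>', '<': '^<',
--         '(': '^(', ')': '^)', '%': '%%', '!': '^!'}
--
--
-- def build_file_section(rel_path, lines):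
--     label = 'write_' + ''.join('_' if c in './' else c for c in rel_path)
--     body_lines = ['  echo.' if line == '' else
--                   '  echo ' + ''.join(_ESC.get(c, c) for c in line)
--                   for line in lines] or ['  echo.']
--     section = '\n'.join([f':{label}', 'setlocal DisableDelayedExpansion',
--                          '> "%~1" (', *body_lines, ')', 'endlocal', 'exit /b'])
--     return label, section
-- ===== Notes on version B (the rewrite author's own statement) =====
-- stated objective: alternative
-- what changed: The nine sequential whole-string replace passes of escape_line (and the two replace passes of make_label_name) are collapsed into a single per-character table-driven pass over each line, safe because only '^' (escaped first) ever appears in a replacement's output.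
import Mathlib
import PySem

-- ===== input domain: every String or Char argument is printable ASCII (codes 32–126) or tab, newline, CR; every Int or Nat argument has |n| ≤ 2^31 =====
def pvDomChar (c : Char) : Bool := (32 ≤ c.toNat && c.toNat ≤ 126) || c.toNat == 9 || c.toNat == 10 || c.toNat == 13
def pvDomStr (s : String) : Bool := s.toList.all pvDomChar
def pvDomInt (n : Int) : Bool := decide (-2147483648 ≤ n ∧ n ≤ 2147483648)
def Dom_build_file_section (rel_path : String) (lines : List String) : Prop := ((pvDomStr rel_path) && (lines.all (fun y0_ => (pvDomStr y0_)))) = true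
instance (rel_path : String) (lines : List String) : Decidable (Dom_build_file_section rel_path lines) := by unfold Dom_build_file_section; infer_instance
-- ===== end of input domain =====

set_option maxHeartbeats 1000000


-- B replaces A's nine sequential whole-string replace passes (and make_label_name's two) by one
-- table-driven per-character pass; return values are proved equal on the whole domain.

-- ===== PORT A =====
-- the nine (src, target) replacement pairs of escape_line, in A's order
def escReplacements : List (List Char × List Char) :=
  [(['^'], ['^','^']), (['&'], ['^','&']), (['|'], ['^','|']), (['>'], ['^','>']),
   (['<'], ['^','<']), (['('], ['^','(']), ([')'], ['^',')']), (['%'], ['%','%']),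
   (['!'], ['^','!'])]

def escape_line (line : String) : String :=
  if line = "" then "echo."
  else
    let escaped := escReplacements.foldl
      (fun e p => PySem.Chars.replace e p.1 p.2) line.toList
    String.mk ("echo ".toList ++ escaped)

def make_label_name (rel_path : String) : String :=
  let label := PySem.Chars.replace (PySem.Chars.replace rel_path.toList ['/'] ['_']) ['.'] ['_']
  String.mk ("write_".toList ++ label)

def build_file_section (rel_path : String) (lines : List String) : String × String :=
  let label := make_label_name rel_path
  let mapped := lines.map (fun line => String.mk ("  ".toList ++ (escape_line line).toList))
  let body_lines := if mapped = [] then ["  echo."] else mapped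
  let sec_lines :=
    [String.mk (':' :: label.toList), "setlocal DisableDelayedExpansion", "> \"%~1\" ("]
      ++ body_lines ++ [")", "endlocal", "exit /b"]
  let sec := PySem.Str.join "\n" sec_lines
  (label, sec)

-- ===== PORT B =====
-- the _ESC table lookup: _ESC.get(c, c)
def escChar (c : Char) : List Char :=
  if c = '^' then ['^','^'] else if c = '&' then ['^','&'] else if c = '|' then ['^','|']
  else if c = '>' then ['^','>'] else if c = '<' then ['^','<'] else if c = '(' then ['^','(']
  else if c = ')' then ['^',')'] else if c = '%' then ['%','%'] else if c = '!' then ['^','!']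
  else [c]

-- '_' if c in './' else c
def labelChar (c : Char) : Char := if c = '.' ∨ c = '/' then '_' else c

def build_file_section_alt (rel_path : String) (lines : List String) : String × String :=
  let label := String.mk ("write_".toList ++ rel_path.toList.map labelChar)
  let mapped := lines.map (fun line =>
    if line = "" then "  echo."
    else String.mk ("  echo ".toList ++ line.toList.flatMap escChar))
  let body_lines := if mapped = [] then ["  echo."] else mapped
  let sec := PySem.Str.join "\n"
    ([String.mk (':' :: label.toList), "setlocal DisableDelayedExpansion", "> \"%~1\" ("]
      ++ body_lines ++ [")", "endlocal", "exit /b"])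
  (label, sec)

-- ===== PRECONDITION & SPEC =====
def Spec_build_file_section (rel_path : String) (lines : List String) (out : String × String) : Prop := out = build_file_section_alt rel_path lines
instance (rel_path : String) (lines : List String) (out : String × String) : Decidable (Spec_build_file_section rel_path lines out) := by unfold Spec_build_file_section; infer_instance

-- ===== CLAIM (what is proved, stated in full; the proofs are below) =====
def Claim_equal_build_file_section : Prop := ∀ (rel_path : String) (lines : List String), Dom_build_file_section rel_path lines → Spec_build_file_section rel_path lines (build_file_section rel_path lines)

-- ===== LEMMAS AND PROOFS =====

-- single-character str.replace is a per-character flatMap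
theorem replace_go_single (a : Char) (new : List Char) :
    ∀ (fuel : Nat) (l acc : List Char), l.length ≤ fuel →
      PySem.Chars.replace.go [a] new fuel l acc
        = acc.reverse ++ l.flatMap (fun c => if c = a then new else [c]) := by
  intro fuel
  induction fuel with
  | zero =>
    intro l acc h
    have : l = [] := List.eq_nil_of_length_eq_zero (Nat.le_zero.mp h)
    subst this
    simp [PySem.Chars.replace.go]
  | succ n ih =>
    intro l acc h
    cases l with
    | nil => simp [PySem.Chars.replace.go]
    | cons c t =>
      by_cases hc : c = a
      · subst hc
        have hp : List.isPrefixOf [c] (c :: t) = true := by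
          simp [List.isPrefixOf]
        simp only [PySem.Chars.replace.go, hp]
        rw [ih]
        · simp
        · simpa using Nat.le_of_succ_le_succ h
      · have hp : List.isPrefixOf [a] (c :: t) = false := by
          simp [List.isPrefixOf]
          exact fun h' => hc h'.symm
        simp only [PySem.Chars.replace.go, hp, Bool.false_eq_true, if_false]
        rw [ih]
        · simp [hc]
        · simpa using Nat.le_of_succ_le_succ h

theorem replace_single (s : List Char) (a : Char) (new : List Char) :
    PySem.Chars.replace s [a] new = s.flatMap (fun c => if c = a then new else [c]) := by
  unfold PySem.Chars.replace
  simp only [List.isEmpty_cons, Bool.false_eq_true, if_false]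
  simpa using replace_go_single a new s.length s [] (Nat.le_refl _)

theorem flatMap_comp {α : Type} (f g : α → List α) (s : List α) :
    (s.flatMap f).flatMap g = s.flatMap (fun c => (f c).flatMap g) := by
  induction s with
  | nil => rfl
  | cons c cs ih => simp [List.flatMap_cons, List.flatMap_append, ih]

-- the nine-pass replace chain equals the single-pass table escape
theorem chain_eq (s : List Char) :
    escReplacements.foldl (fun e p => PySem.Chars.replace e p.1 p.2) s
      = s.flatMap escChar := by
  simp only [escReplacements, List.foldl, replace_single, flatMap_comp]
  induction s with
  | nil => rfl
  | cons c cs ih =>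
    rw [List.flatMap_cons, List.flatMap_cons, ih]
    congr 1
    by_cases h1 : c = '^'; · subst h1; decide
    by_cases h2 : c = '&'; · subst h2; decide
    by_cases h3 : c = '|'; · subst h3; decide
    by_cases h4 : c = '>'; · subst h4; decide
    by_cases h5 : c = '<'; · subst h5; decide
    by_cases h6 : c = '('; · subst h6; decide
    by_cases h7 : c = ')'; · subst h7; decide
    by_cases h8 : c = '%'; · subst h8; decide
    by_cases h9 : c = '!'; · subst h9; decide
    simp [escChar, h1, h2, h3, h4, h5, h6, h7, h8, h9]

-- the two-pass label replace chain equals the single-pass character map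
theorem label_eq (s : List Char) :
    PySem.Chars.replace (PySem.Chars.replace s ['/'] ['_']) ['.'] ['_']
      = s.map labelChar := by
  simp only [replace_single, flatMap_comp]
  induction s with
  | nil => rfl
  | cons c cs ih =>
    rw [List.flatMap_cons, List.map_cons, ih]
    by_cases h1 : c = '/'; · subst h1; rfl
    by_cases h2 : c = '.'; · subst h2; rfl
    simp [labelChar, h1, h2]

theorem toList_mk (l : List Char) : (String.mk l).toList = l := Eq.symm (String.ofList_eq.mp rfl)

theorem body_eq (line : String) :
    String.mk ("  ".toList ++ (escape_line line).toList)
      = if line = "" then "  echo."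
        else String.mk ("  echo ".toList ++ line.toList.flatMap escChar) := by
  by_cases h : line = ""
  · subst h; rfl
  · simp only [escape_line, if_neg h, chain_eq]
    rw [toList_mk, ← List.append_assoc]
    have hlit : ("  ".toList ++ "echo ".toList : List Char) = "  echo ".toList := by decide
    rw [hlit]

-- ===== VERDICT (by name: the statement is the Claim_ definition above) =====
theorem build_file_section_spec : Claim_equal_build_file_section := by
  intro rel_path lines _
  show build_file_section rel_path lines = build_file_section_alt rel_path lines
  have hb : lines.map (fun line => String.mk ("  ".toList ++ (escape_line line).toList))
      = lines.map (fun line =>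
          if line = "" then "  echo."
          else String.mk ("  echo ".toList ++ line.toList.flatMap escChar)) :=
    List.map_congr_left (fun l _ => body_eq l)
  simp only [build_file_section, build_file_section_alt, make_label_name, label_eq, hb]
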